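-- pv_equiv track=rewrite | github.com/gokulkumar1014/wtchtwr-ai-agent | agent/compose.py | _escape_markdown_table_cell
-- ===== SOURCE A (Python) =====
-- def _escape_markdown_table_cell(text: str) -> str:
--     """Escape characters that would break markdown tables."""
--     if not text:
--         return ""
--     escaped = text.replace("\\", "\\\\")
--     escaped = escaped.replace("\r\n", "\n").replace("\r", "\n")
--     escaped = escaped.replace("\n", "<br>")
--     for char in ("|", "*", "_", "`", "[", "]"):
--         escaped = escaped.replace(char, f"\\{char}")
--     return escaped.strip()
-- ===== SOURCE B (Python) =====
-- def _escape_markdown_table_cell(text: str) -> str: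
--     """Escape characters that would break markdown tables (single pass)."""
--     if not text:
--         return ""
--     specials = "|*_`[]"
--     parts = []
--     i = 0
--     n = len(text)
--     while i < n:
--         c = text[i]
--         if c == "\r":
--             if i + 1 < n and text[i + 1] == "\n":
--                 i += 1
--             parts.append("<br>")
--         elif c == "\n":
--             parts.append("<br>")
--         elif c == "\\":
--             parts.append("\\\\")
--         elif c in specials:
--             parts.append("\\" + c)
--         else:
--             parts.append(c)
--         i += 1
--     return "".join(parts).strip()
-- ===== Notes on version B (the rewrite author's own statement) =====
-- stated objective: alternative
-- what changed: A makes ten sequential str.replace passes over the string; B does a single left-to-right scan with a CRLF lookahead, mapping each character to its escaped form and joining once.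
import Mathlib
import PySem

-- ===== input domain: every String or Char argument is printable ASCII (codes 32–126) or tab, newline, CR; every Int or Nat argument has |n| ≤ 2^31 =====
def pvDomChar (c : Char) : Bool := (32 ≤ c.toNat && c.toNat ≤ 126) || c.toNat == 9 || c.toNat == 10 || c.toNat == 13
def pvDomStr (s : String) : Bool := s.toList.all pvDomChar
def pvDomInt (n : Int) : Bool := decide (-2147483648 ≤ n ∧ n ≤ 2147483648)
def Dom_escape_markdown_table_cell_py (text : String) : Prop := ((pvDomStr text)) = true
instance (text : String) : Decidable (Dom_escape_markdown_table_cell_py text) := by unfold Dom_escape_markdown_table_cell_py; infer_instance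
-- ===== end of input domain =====

-- B replaces A's ten sequential str.replace passes by one left-to-right scan with a CRLF
-- lookahead (alternative decomposition; not claimed faster).

-- ===== PORT A =====
-- literal transliteration of A: guard, backslash doubling, newline normalisation,
-- <br> substitution, then a fold over the six special characters, then strip
def escape_markdown_table_cell_py (text : String) : String :=
  if text = "" then ""
  else
    let e1 := PySem.Str.replace text "\\" "\\\\"
    let e2 := PySem.Str.replace (PySem.Str.replace e1 "\r\n" "\n") "\r" "\n"
    let e3 := PySem.Str.replace e2 "\n" "<br>"
    let e4 := ["|", "*", "_", "`", "[", "]"].foldl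
      (fun e ch => PySem.Str.replace e ch ("\\" ++ ch)) e3
    PySem.Str.strip e4

-- ===== PORT B =====
-- B-side helper: the single pass of Source B (its while-loop with index i and parts list,
-- written as the obvious structural recursion over the character list; "".join = flatten)
def escapeAltGo (s : List Char) : List Char :=
  match s with
  | [] => []
  | c :: t =>
    if c = '\r' then
      '<' :: 'b' :: 'r' :: '>' :: escapeAltGo (if t.head? = some '\n' then t.tail else t)
    else if c = '\n' then '<' :: 'b' :: 'r' :: '>' :: escapeAltGo t
    else if c = '\\' then '\\' :: '\\' :: escapeAltGo t
    else if c ∈ ['|', '*', '_', '`', '[', ']'] then '\\' :: c :: escapeAltGo t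
    else c :: escapeAltGo t
termination_by s.length
decreasing_by
  all_goals try split
  all_goals simp

def escape_markdown_table_cell_py_alt (text : String) : String :=
  if text = "" then ""
  else PySem.Str.strip (String.ofList (escapeAltGo text.toList))

-- ===== PRECONDITION & SPEC =====
def Spec_escape_markdown_table_cell_py (text : String) (out : String) : Prop := out = escape_markdown_table_cell_py_alt text
instance (text : String) (out : String) : Decidable (Spec_escape_markdown_table_cell_py text out) := by unfold Spec_escape_markdown_table_cell_py; infer_instance

-- ===== CLAIM (what is proved, stated in full; the proofs are below) =====
def Claim_equal_escape_markdown_table_cell_py : Prop := ∀ (text : String), Dom_escape_markdown_table_cell_py text → Spec_escape_markdown_table_cell_py text (escape_markdown_table_cell_py text)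

-- ===== LEMMAS AND PROOFS =====

-- a fuel-free rendering of PySem.Chars.replace for a nonempty pattern
def repSim (old new : List Char) (s : List Char) : List Char :=
  match s with
  | [] => []
  | c :: t =>
    if old.isPrefixOf (c :: t) then new ++ repSim old new (List.drop (old.length - 1) t)
    else c :: repSim old new t
termination_by s.length
decreasing_by all_goals (simp; try omega)

theorem repSim_go (old new : List Char) (hold : old ≠ []) :
    ∀ (fuel : Nat) (l acc : List Char), l.length ≤ fuel →
      PySem.Chars.replace.go old new fuel l acc = acc.reverse ++ repSim old new l := by
  intro fuel
  induction fuel with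
  | zero =>
    intro l acc h
    have : l = [] := List.eq_nil_of_length_eq_zero (Nat.le_zero.mp h)
    subst this
    simp [PySem.Chars.replace.go, repSim]
  | succ n ih =>
    intro l acc h
    match l with
    | [] => simp [PySem.Chars.replace.go, repSim]
    | c :: t =>
      rw [PySem.Chars.replace.go]
      by_cases hp : old.isPrefixOf (c :: t)
      · rw [if_pos hp]
        rw [repSim, if_pos hp]
        have hlen : 1 ≤ old.length := by
          cases old with
          | nil => exact absurd rfl hold
          | cons _ _ => simp
        have hdrop : List.drop old.length (c :: t) = List.drop (old.length - 1) t := by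
          cases old with
          | nil => exact absurd rfl hold
          | cons o os => simp
        rw [hdrop, ih _ _ (by simp at h ⊢; omega)]
        simp
      · rw [if_neg hp, repSim, if_neg hp, ih _ _ (by simp at h; omega)]
        simp
  
theorem replace_eq_repSim (s old new : List Char) (hold : old ≠ []) :
    PySem.Chars.replace s old new = repSim old new s := by
  rw [PySem.Chars.replace, if_neg (by simpa using hold)]
  simpa using repSim_go old new hold s.length s [] (le_refl _)

-- cons unfolding for a single-character pattern
theorem repSim_one_cons (p : Char) (new : List Char) (c : Char) (t : List Char) :
    repSim [p] new (c :: t) = (if c = p then new ++ repSim [p] new t else c :: repSim [p] new t) := by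
  rw [repSim]
  by_cases h : c = p
  · subst h; simp [List.isPrefixOf]
  · simp [List.isPrefixOf, h, Ne.symm h]

theorem repSim_nil (old new : List Char) : repSim old new [] = [] := by rw [repSim]

theorem repSim_crlf_cons_ne (new : List Char) (c : Char) (t : List Char) (h : c ≠ '\r') :
    repSim ['\r', '\n'] new (c :: t) = c :: repSim ['\r', '\n'] new t := by
  rw [repSim]
  simp [List.isPrefixOf, Ne.symm h]

theorem repSim_crlf_match (new : List Char) (t : List Char) :
    repSim ['\r', '\n'] new ('\r' :: '\n' :: t) = new ++ repSim ['\r', '\n'] new t := by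
  rw [repSim]
  simp [List.isPrefixOf]

theorem repSim_cr_single (new : List Char) :
    repSim ['\r', '\n'] new ['\r'] = ['\r'] := by
  rw [repSim]
  simp [List.isPrefixOf, repSim_nil]

theorem repSim_cr_cons_ne (new : List Char) (d : Char) (t : List Char) (h : d ≠ '\n') :
    repSim ['\r', '\n'] new ('\r' :: d :: t) = '\r' :: repSim ['\r', '\n'] new (d :: t) := by
  rw [repSim]
  simp [List.isPrefixOf, Ne.symm h]

-- the Chars-level pipeline of A
def pipeA (cs : List Char) : List Char :=
  let e1 := repSim ['\\'] ['\\', '\\'] cs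
  let e2 := repSim ['\r'] ['\n'] (repSim ['\r', '\n'] ['\n'] e1)
  let e3 := repSim ['\n'] ['<', 'b', 'r', '>'] e2
  repSim [']'] ['\\', ']']
    (repSim ['['] ['\\', '[']
      (repSim ['`'] ['\\', '`']
        (repSim ['_'] ['\\', '_']
          (repSim ['*'] ['\\', '*']
            (repSim ['|'] ['\\', '|'] e3)))))

theorem repSim_cr_cons_head (new l : List Char) (h : l.head? ≠ some '\n') :
    repSim ['\r', '\n'] new ('\r' :: l) = '\r' :: repSim ['\r', '\n'] new l := by
  match l with
  | [] => rw [repSim_cr_single, repSim_nil]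
  | d :: t =>
    have hd : d ≠ '\n' := by simpa using h
    exact repSim_cr_cons_ne new d t hd

theorem e1_head (d : Char) (t : List Char) :
    (repSim ['\\'] ['\\', '\\'] (d :: t)).head? = some (if d = '\\' then '\\' else d) := by
  rw [repSim_one_cons]
  split_ifs <;> simp

theorem escapeAltGo_nil : escapeAltGo [] = [] := by rw [escapeAltGo]

theorem escapeAltGo_cons (c : Char) (t : List Char) :
    escapeAltGo (c :: t) =
      if c = '\r' then
        '<' :: 'b' :: 'r' :: '>' :: escapeAltGo (if t.head? = some '\n' then t.tail else t)
      else if c = '\n' then '<' :: 'b' :: 'r' :: '>' :: escapeAltGo t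
      else if c = '\\' then '\\' :: '\\' :: escapeAltGo t
      else if c ∈ ['|', '*', '_', '`', '[', ']'] then '\\' :: c :: escapeAltGo t
      else c :: escapeAltGo t := by
  rw [escapeAltGo]

theorem pipe_cr_tail (X : List Char) :
    repSim [']'] ['\\', ']']
        (repSim ['['] ['\\', '[']
          (repSim ['`'] ['\\', '`']
            (repSim ['_'] ['\\', '_']
              (repSim ['*'] ['\\', '*']
                (repSim ['|'] ['\\', '|']
                  (repSim ['\n'] ['<', 'b', 'r', '>'] (repSim ['\r'] ['\n'] ('\r' :: X)))))))) =
      '<' :: 'b' :: 'r' :: '>' ::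
        repSim [']'] ['\\', ']']
          (repSim ['['] ['\\', '[']
            (repSim ['`'] ['\\', '`']
              (repSim ['_'] ['\\', '_']
                (repSim ['*'] ['\\', '*']
                  (repSim ['|'] ['\\', '|']
                    (repSim ['\n'] ['<', 'b', 'r', '>'] (repSim ['\r'] ['\n'] X))))))) := by
  simp [repSim_one_cons]

theorem pipeA_eq_altGo : ∀ (n : Nat) (cs : List Char), cs.length ≤ n → pipeA cs = escapeAltGo cs := by
  intro n
  induction n with
  | zero =>
    intro cs h
    have : cs = [] := List.eq_nil_of_length_eq_zero (Nat.le_zero.mp h)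
    subst this
    simp [pipeA, repSim_nil, escapeAltGo_nil]
  | succ n ih =>
    intro cs h
    match cs with
    | [] => simp [pipeA, repSim_nil, escapeAltGo_nil]
    | c :: t =>
      have ht : t.length ≤ n := by simp at h; omega
      by_cases h1 : c = '\r'
      · subst h1
        match t with
        | [] =>
          simp [pipeA, repSim_one_cons, repSim_cr_single, repSim_nil, escapeAltGo_cons,
            escapeAltGo_nil]
        | '\n' :: t' =>
          have IH := ih t' (by simp at ht; omega)
          simp only [pipeA] at IH ⊢
          simp [repSim_one_cons, repSim_crlf_match, escapeAltGo_cons, IH]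
        | d :: t' =>
          by_cases hd : d = '\n'
          · subst hd
            have IH := ih t' (by simp at ht; omega)
            simp only [pipeA] at IH ⊢
            simp [repSim_one_cons, repSim_crlf_match, escapeAltGo_cons, IH]
          · have IH := ih (d :: t') ht
            simp only [pipeA] at IH ⊢
            rw [repSim_one_cons]
            rw [if_neg (by decide)]
            rw [repSim_cr_cons_head _ _ (by
              rw [e1_head]
              split_ifs with hb
              · simp
              · simpa using hd)]
            rw [pipe_cr_tail, IH]
            conv_rhs => rw [escapeAltGo_cons]
            simp [hd]
      · by_cases h2 : c = '\n'
        · subst h2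
          have IH := ih t ht
          simp only [pipeA] at IH ⊢
          simp [repSim_one_cons, repSim_crlf_cons_ne, escapeAltGo_cons, IH]
        · by_cases h3 : c = '\\'
          · subst h3
            have IH := ih t ht
            simp only [pipeA] at IH ⊢
            simp [repSim_one_cons, repSim_crlf_cons_ne, escapeAltGo_cons, IH]
          · have IH := ih t ht
            simp only [pipeA] at IH ⊢
            by_cases h4 : c = '|'
            · subst h4; simp [repSim_one_cons, repSim_crlf_cons_ne, escapeAltGo_cons, IH]
            · by_cases h5 : c = '*'
              · subst h5; simp [repSim_one_cons, repSim_crlf_cons_ne, escapeAltGo_cons, IH]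
              · by_cases h6 : c = '_'
                · subst h6; simp [repSim_one_cons, repSim_crlf_cons_ne, escapeAltGo_cons, IH]
                · by_cases h7 : c = '`'
                  · subst h7; simp [repSim_one_cons, repSim_crlf_cons_ne, escapeAltGo_cons, IH]
                  · by_cases h8 : c = '['
                    · subst h8; simp [repSim_one_cons, repSim_crlf_cons_ne, escapeAltGo_cons, IH]
                    · by_cases h9 : c = ']'
                      · subst h9
                        simp [repSim_one_cons, repSim_crlf_cons_ne, escapeAltGo_cons, IH]
                      · rw [repSim_one_cons, if_neg h3,
                          repSim_crlf_cons_ne _ _ _ h1, repSim_one_cons, if_neg h1,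
                          repSim_one_cons, if_neg h2,
                          repSim_one_cons, if_neg h4, repSim_one_cons, if_neg h5,
                          repSim_one_cons, if_neg h6, repSim_one_cons, if_neg h7,
                          repSim_one_cons, if_neg h8, repSim_one_cons, if_neg h9,
                          escapeAltGo_cons]
                        simp [h1, h2, h3, h4, h5, h6, h7, h8, h9, IH]

theorem pipeA_toList (text : String) :
    (let e1 := PySem.Str.replace text "\\" "\\\\"
     let e2 := PySem.Str.replace (PySem.Str.replace e1 "\r\n" "\n") "\r" "\n"
     let e3 := PySem.Str.replace e2 "\n" "<br>"
     let e4 := ["|", "*", "_", "`", "[", "]"].foldl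
       (fun e ch => PySem.Str.replace e ch ("\\" ++ ch)) e3
     e4).toList = pipeA text.toList := by
  simp only [List.foldl, PySem.Str.toList_replace, pipeA]
  rw [replace_eq_repSim _ _ _ (by decide), replace_eq_repSim _ _ _ (by decide),
    replace_eq_repSim _ _ _ (by decide), replace_eq_repSim _ _ _ (by decide)]
  rw [replace_eq_repSim _ _ _ (by decide), replace_eq_repSim _ _ _ (by decide),
    replace_eq_repSim _ _ _ (by decide), replace_eq_repSim _ _ _ (by decide),
    replace_eq_repSim _ _ _ (by decide), replace_eq_repSim _ _ _ (by decide)]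
  simp

theorem escape_markdown_table_cell_py_spec : Claim_equal_escape_markdown_table_cell_py := by
  unfold Claim_equal_escape_markdown_table_cell_py
  intro text _
  unfold Spec_escape_markdown_table_cell_py
  unfold escape_markdown_table_cell_py escape_markdown_table_cell_py_alt
  by_cases hempty : text = ""
  · simp [hempty]
  · rw [if_neg hempty, if_neg hempty]
    apply String.toList_inj.mp
    rw [PySem.Str.toList_strip, PySem.Str.toList_strip]
    have h1 := pipeA_toList text
    simp only at h1
    rw [h1, pipeA_eq_altGo text.toList.length text.toList (le_refl _)]
    simp
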